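-- pv_equiv track=rewrite | github.com/akashdeep3194/python-quickies | Return subsets sum to K.py | subsetSumtoK
-- ===== SOURCE A (Python) =====
-- def subsetSumtoK(arr, k):
--     if len(arr) == 0:
--         return []
--     ans = []
--     sa1 = subsetSumtoK(arr[1:], k - arr[0])
--     sa2 = subsetSumtoK(arr[1:], k)
--     tmp = []
--     tmp2 = []
--     if len(sa1) > 0:
--         for l in sa1:
--             tmp2.append(arr[0])
--             tmp2.extend(l)
--             tmp.append(tmp2)
--             tmp2 = []
--         ans.extend(tmp)
--     if len(sa2) > 0:
--         ans.extend(sa2)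
--     if arr[0] == k:
--         x = [arr[0]]
--         ans.append(x)
--     return ans
-- ===== SOURCE B (Python) =====
-- def subsetSumtoK(arr, k):
--     # Top-down DP: memoize the recursion on (index, target) so each distinct
--     # state is solved once; same build order as the naive enumeration.
--     memo = {}
--     def go(i, t):
--         if i == len(arr):
--             return []
--         key = (i, t)
--         if key in memo:
--             return memo[key]
--         res = ([[arr[i]] + l for l in go(i + 1, t - arr[i])]
--                + go(i + 1, t)
--                + ([[arr[i]]] if arr[i] == t else []))
--         memo[key] = res
--         return res
--     return go(0, k)
-- ===== Notes on version B (the rewrite author's own statement) =====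
-- stated objective: alternative
-- what changed: Replaces the naive exponential recursion with a top-down DP that memoizes on (index, target) in a dict threaded through the recursion, so each distinct state is computed once while preserving the exact build order; intended as faster (measured 2.57x at the largest size both finished, unconfirmed at larger sizes where the output itself is exponential).
import Mathlib
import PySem

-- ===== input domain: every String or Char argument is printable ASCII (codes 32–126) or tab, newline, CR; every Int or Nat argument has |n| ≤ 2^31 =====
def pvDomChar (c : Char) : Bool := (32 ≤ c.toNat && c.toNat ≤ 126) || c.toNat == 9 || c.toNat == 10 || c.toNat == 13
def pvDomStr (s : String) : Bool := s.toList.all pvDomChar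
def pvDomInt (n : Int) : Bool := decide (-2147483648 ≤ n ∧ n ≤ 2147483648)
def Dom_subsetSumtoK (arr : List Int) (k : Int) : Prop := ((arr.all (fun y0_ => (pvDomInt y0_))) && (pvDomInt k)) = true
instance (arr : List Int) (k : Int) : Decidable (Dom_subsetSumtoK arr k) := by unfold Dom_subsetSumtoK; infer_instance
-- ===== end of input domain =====

-- B memoizes the recursion on (index, target) in a threaded dict so each distinct state is computed once, preserving the exact build order.

-- ===== PORT A =====
-- literal transliteration of A's exponential recursion (tmp2 = [] then append arr[0] then extend l gives [a] ++ l)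
def subsetSumtoK (arr : List Int) (k : Int) : List (List Int) :=
  match arr with
  | [] => []
  | a :: rest =>
    let sa1 := subsetSumtoK rest (k - a)
    let sa2 := subsetSumtoK rest k
    let tmp := sa1.foldl (fun tmp l => tmp ++ [[a] ++ l]) []
    let ans : List (List Int) := []
    let ans := if sa1.length > 0 then ans ++ tmp else ans
    let ans := if sa2.length > 0 then ans ++ sa2 else ans
    let ans := if a = k then ans ++ [[a]] else ans
    ans

-- ===== PORT B =====
-- go walks the suffix of arr (empty suffix ⟺ i = len(arr); head = arr[i]), threading the memo dict.
def goMemo : List Int → Nat → Int → PySem.Dict (Nat × Int) (List (List Int)) →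
    (List (List Int) × PySem.Dict (Nat × Int) (List (List Int)))
  | [], _, _, memo => ([], memo)
  | x :: rest, i, t, memo =>
    match memo.get? (i, t) with
    | some v => (v, memo)
    | none =>
      let p1 := goMemo rest (i + 1) (t - x) memo
      let p2 := goMemo rest (i + 1) t p1.2
      let res := p1.1.map (fun l => x :: l) ++ p2.1 ++ (if x = t then [[x]] else [])
      (res, p2.2.insert (i, t) res)

def subsetSumtoK_alt (arr : List Int) (k : Int) : List (List Int) :=
  (goMemo arr 0 k PySem.Dict.empty).1

-- ===== PRECONDITION & SPEC =====
def Spec_subsetSumtoK (arr : List Int) (k : Int) (out : List (List Int)) : Prop := out = subsetSumtoK_alt arr k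
instance (arr : List Int) (k : Int) (out : List (List Int)) : Decidable (Spec_subsetSumtoK arr k out) := by unfold Spec_subsetSumtoK; infer_instance

-- ===== CLAIM (what is proved, stated in full; the proofs are below) =====
def Claim_equal_subsetSumtoK : Prop := ∀ (arr : List Int) (k : Int), Dom_subsetSumtoK arr k → Spec_subsetSumtoK arr k (subsetSumtoK arr k)

-- ===== LEMMAS AND PROOFS =====

-- the tmp-building loop of A is a map
theorem foldl_append_cons (x : Int) (sa : List (List Int)) (acc : List (List Int)) :
    sa.foldl (fun tmp l => tmp ++ [[x] ++ l]) acc = acc ++ sa.map (fun l => x :: l) := by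
  induction sa generalizing acc with
  | nil => simp
  | cons h tl ih => rw [List.foldl_cons, ih]; simp

-- A's result in closed form
theorem subsetSumtoK_cons (x : Int) (rest : List Int) (t : Int) :
    subsetSumtoK (x :: rest) t =
      (subsetSumtoK rest (t - x)).map (fun l => x :: l) ++ subsetSumtoK rest t ++
        (if x = t then [[x]] else []) := by
  rw [subsetSumtoK]
  simp only [foldl_append_cons]
  rcases subsetSumtoK rest (t - x) with _ | ⟨l1, s1⟩ <;>
    rcases subsetSumtoK rest t with _ | ⟨l2, s2⟩ <;>
      simp <;> split_ifs <;> simp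

-- memo invariant: every stored value is A's answer for the corresponding suffix
def MemoInv (arr : List Int) (m : PySem.Dict (Nat × Int) (List (List Int))) : Prop :=
  ∀ (i : Nat) (t : Int) (v : List (List Int)), m.get? (i, t) = some v → v = subsetSumtoK (arr.drop i) t

theorem goMemo_correct (arr : List Int) :
    ∀ (l : List Int) (i : Nat) (t : Int) (m : PySem.Dict (Nat × Int) (List (List Int))),
      l = arr.drop i → MemoInv arr m →
      (goMemo l i t m).1 = subsetSumtoK l t ∧ MemoInv arr (goMemo l i t m).2 := by
  intro l
  induction l with
  | nil => intro i t m _ hm; exact ⟨rfl, hm⟩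
  | cons x rest ih =>
    intro i t m hl hm
    rw [goMemo]
    cases hget : m.get? (i, t) with
    | some v =>
      refine ⟨?_, hm⟩
      show v = subsetSumtoK (x :: rest) t
      rw [hm i t v hget, ← hl]
    | none =>
      have hrest : rest = arr.drop (i + 1) := by
        have h1 : List.drop 1 (arr.drop i) = arr.drop (i + 1) := by
          rw [List.drop_drop]
        rw [← h1, ← hl]
        rfl
      obtain ⟨h1v, h1m⟩ := ih (i + 1) (t - x) m hrest hm
      obtain ⟨h2v, h2m⟩ := ih (i + 1) t _ hrest h1m
      constructor
      · simp only [h1v, h2v, subsetSumtoK_cons]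
      · intro j s v hv
        rw [PySem.Dict.get?_insert] at hv
        by_cases hk : ((j, s) : Nat × Int) = (i, t)
        · obtain ⟨hj, hs⟩ : j = i ∧ s = t := ⟨congrArg Prod.fst hk, congrArg Prod.snd hk⟩
          subst hj; subst hs
          simp at hv
          rw [← hv, h1v, h2v, ← hl, subsetSumtoK_cons]
          simp
        · simp [hk] at hv
          exact h2m j s v hv

-- ===== VERDICT (by name: the statement is the Claim_ definition above) =====
theorem subsetSumtoK_spec : Claim_equal_subsetSumtoK := by
  intro arr k _
  unfold Spec_subsetSumtoK subsetSumtoK_alt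
  have hinv : MemoInv arr PySem.Dict.empty := by
    intro i t v hv
    simp [PySem.Dict.get?_empty] at hv
  exact ((goMemo_correct arr arr 0 k PySem.Dict.empty (by simp) hinv).1).symm
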